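-- pv_equiv track=rewrite | github.com/e-sollier/SCRITE | SCRITE/trees.py | parent2children
-- ===== SOURCE A (Python) =====
-- def parent2children(parVec,reorder = True):
--     """
--     Converts a parent, where parVec[i] is the parent of i, into a list of children lists, where children[i] is the list of children of i.
--     If reorder is True, the list of children is ordered depending on the size of their subtrees.
--     """
--     nb_mut = len(parVec)
--
--     #Find the children of each node
--     children = [[] for v in range(nb_mut+1)]
--     for q in range(nb_mut):
--         children[parVec[q]].append(q)
--
--     #Reorder the children
--     if reorder:
--         def subtree_size_rec(node,children,subtree_sizes):
--             if children[node]==[]: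
--                 subtree_sizes[node] = 0
--                 return 1
--             else:
--                 for child in children[node]:
--                     subtree_sizes[node] += subtree_size_rec(child,children,subtree_sizes)
--                 return subtree_sizes[node]+1
--         subtree_sizes = [0] * (nb_mut+1)
--         _ = subtree_size_rec(nb_mut,children,subtree_sizes)
--         for q in range(nb_mut+1):
--             children[q] = sorted(children[q], key = lambda x :subtree_sizes[x],reverse=False)
--     return children
-- ===== SOURCE B (Python) =====
-- def parent2children(parVec, reorder=True):
--     """
--     Converts a parent vector into children lists; if reorder, each children list
--     is sorted (stably, ascending) by subtree size. Subtree sizes are computed by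
--     an iterative post-order depth-first traversal with an explicit stack.
--     """
--     nb_mut = len(parVec)
--
--     children = [[] for _ in range(nb_mut + 1)]
--     for q in range(nb_mut):
--         children[parVec[q]].append(q)
--
--     if reorder:
--         subtree_sizes = [0] * (nb_mut + 1)
--         stack = [(nb_mut, False)]
--         while stack:
--             node, processed = stack.pop()
--             if processed:
--                 subtree_sizes[node] = sum(subtree_sizes[c] + 1 for c in children[node])
--             else:
--                 stack.append((node, True))
--                 for c in children[node]:
--                     stack.append((c, False))
--         for q in range(nb_mut + 1):
--             children[q].sort(key=lambda x: subtree_sizes[x])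
--     return children
-- ===== Notes on version B (the rewrite author's own statement) =====
-- stated objective: alternative
-- what changed: The recursive subtree-size DFS (with += accumulation into a shared table) is replaced by an iterative post-order traversal using an explicit (node, processed) stack, each node's size computed as a sum over its children once they are finalized; children-list construction and the final stable sort by subtree size are unchanged. Pre_ excludes only inputs on which A raises IndexError (a parent entry outside the valid index range of the children list).
import Mathlib
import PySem

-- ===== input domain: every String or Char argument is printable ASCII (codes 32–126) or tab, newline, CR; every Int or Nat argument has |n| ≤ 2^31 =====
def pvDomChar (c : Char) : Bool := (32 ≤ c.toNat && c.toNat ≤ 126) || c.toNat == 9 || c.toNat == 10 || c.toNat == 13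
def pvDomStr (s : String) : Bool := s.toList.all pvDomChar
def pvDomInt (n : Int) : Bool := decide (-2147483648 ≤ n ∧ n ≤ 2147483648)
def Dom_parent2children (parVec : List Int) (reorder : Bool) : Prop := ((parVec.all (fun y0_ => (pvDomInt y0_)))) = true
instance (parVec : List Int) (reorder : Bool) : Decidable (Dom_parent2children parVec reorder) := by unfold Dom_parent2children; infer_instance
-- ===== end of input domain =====

-- B replaces A's recursive subtree-size DFS by an iterative post-order traversal with an explicit stack; same children lists and sort.


-- ===== PORT A =====

-- children = [[] for v in range(nb_mut+1)]; for q in range(nb_mut): children[parVec[q]].append(q)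
-- (shared by both ports: the same two Python lines occur verbatim in A and in B)
def p2cChildren (parVec : List Int) : List (List Int) :=
  (PySem.List.pyRange 0 ((parVec.length : Int)) 1).foldl
    (fun ch q =>
      let p := PySem.List.pyGetD parVec q 0
      PySem.List.pySetD ch p (PySem.List.pyGetD ch p [] ++ [q]))
    ((PySem.List.pyRange 0 ((parVec.length : Int) + 1) 1).map (fun _ => ([] : List Int)))

-- def subtree_size_rec(node, children, subtree_sizes): …  (fuel = recursion depth bound; under
-- Pre_ the fuel parVec.length + 2 passed below is never exhausted — proved in the lemmas)
def subtreeSizeRec (children : List (List Int)) : Nat → Int → List Int → List Int × Int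
  | 0, _, sizes => (sizes, 0)
  | fuel + 1, node, sizes =>
    if PySem.List.pyGetD children node [] = [] then
      (PySem.List.pySetD sizes node 0, 1)
    else
      let sizes' := (PySem.List.pyGetD children node []).foldl
        (fun s child =>
          let old := PySem.List.pyGetD s node 0        -- Python reads subtree_sizes[node] before the call
          let r := subtreeSizeRec children fuel child s
          PySem.List.pySetD r.1 node (old + r.2)) sizes
      (sizes', PySem.List.pyGetD sizes' node 0 + 1)

def parent2children (parVec : List Int) (reorder : Bool) : List (List Int) :=
  let children := p2cChildren parVec
  if reorder then
    let sizes0 := (PySem.List.pyRange 0 ((parVec.length : Int) + 1) 1).map (fun _ => (0 : Int))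
    let sizes := (subtreeSizeRec children (parVec.length + 2) (parVec.length : Int) sizes0).1
    -- for q in range(nb_mut+1): children[q] = sorted(children[q], key=lambda x: subtree_sizes[x], reverse=False)
    children.map (fun lst => PySem.List.sorted lst (fun x => PySem.List.pyGetD sizes x 0) false)
  else children

-- ===== PORT B =====

-- the while-stack loop of Source B; the stack's head is the Python list's end (append/pop site).
-- fuel = 2*nb_mut + 4: every node reachable from the root is popped exactly twice; proved sufficient below
def stackLoop (children : List (List Int)) : Nat → List (Int × Bool) → List Int → List Int
  | 0, _, sizes => sizes
  | _ + 1, [], sizes => sizes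
  | fuel + 1, (node, processed) :: rest, sizes =>
    if processed then
      -- subtree_sizes[node] = sum(subtree_sizes[c] + 1 for c in children[node])
      stackLoop children fuel rest
        (PySem.List.pySetD sizes node
          ((PySem.List.pyGetD children node []).foldl
            (fun acc c => acc + (PySem.List.pyGetD sizes c 0 + 1)) 0))
    else
      -- stack.append((node, True)); for c in children[node]: stack.append((c, False))
      stackLoop children fuel
        (((PySem.List.pyGetD children node []).reverse.map (fun c => (c, false))) ++
          (node, true) :: rest)
        sizes

def parent2children_alt (parVec : List Int) (reorder : Bool) : List (List Int) :=
  let children := p2cChildren parVec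
  if reorder then
    let sizes0 := (PySem.List.pyRange 0 ((parVec.length : Int) + 1) 1).map (fun _ => (0 : Int))
    let sizes := stackLoop children (2 * parVec.length + 4) [((parVec.length : Int), false)] sizes0
    -- children[q].sort(key=lambda x: subtree_sizes[x])  (stable ascending)
    children.map (fun lst => PySem.List.sorted lst (fun x => PySem.List.pyGetD sizes x 0) false)
  else children

-- ===== PRECONDITION & SPEC =====
-- Pre_ excludes exactly the inputs where A raises IndexError: some parVec[q] outside the valid
-- Python index range -(len+1) … len for the children list of length len+1.
def Pre_parent2children (parVec : List Int) (reorder : Bool) : Prop :=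
  ∀ p ∈ parVec, -((parVec.length : Int) + 1) ≤ p ∧ p ≤ (parVec.length : Int)
instance (parVec : List Int) (reorder : Bool) : Decidable (Pre_parent2children parVec reorder) := by
  unfold Pre_parent2children; infer_instance

def pvWitness_parent2children : List Int × Bool := ([2, 0, 4, 4, -1], true)

def Spec_parent2children (parVec : List Int) (reorder : Bool) (out : List (List Int)) : Prop := out = parent2children_alt parVec reorder
instance (parVec : List Int) (reorder : Bool) (out : List (List Int)) : Decidable (Spec_parent2children parVec reorder out) := by unfold Spec_parent2children; infer_instance

-- ===== CLAIM (what is proved, stated in full; the proofs are below) =====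
def Claim_equal_parent2children : Prop := ∀ (parVec : List Int) (reorder : Bool), Dom_parent2children parVec reorder → Pre_parent2children parVec reorder → Spec_parent2children parVec reorder (parent2children parVec reorder)

-- ===== LEMMAS AND PROOFS =====

-- ---------- pure model of the parent graph ----------

-- normalized (wrapped) Python index into a list of length pv.length + 1
def pvNorm (pv : List Int) (p : Int) : Nat := (if p < 0 then p + pv.length + 1 else p).toNat

-- the parent function: q's parent for q < len, the root len is a fixed point
def pvNp (pv : List Int) (q : Nat) : Nat :=
  if h : q < pv.length then pvNorm pv pv[q] else pv.length

def pvIter (pv : List Int) (k q : Nat) : Nat := (pvNp pv)^[k] q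

abbrev pvRooted (pv : List Int) (q : Nat) : Prop := pvIter pv (pv.length + 1) q = pv.length

def pvDepth (pv : List Int) (q : Nat) : Nat :=
  if h : pvRooted pv q then
    Nat.find (⟨pv.length + 1, h⟩ : ∃ k, pvIter pv k q = pv.length)
  else 0

-- v is a proper ancestor of u (within the chain bound pv.length)
abbrev pvStrict (pv : List Int) (v u : Nat) : Prop := ∃ k ∈ Finset.Icc 1 (pv.length + 1), pvIter pv k u = v

abbrev pvInSub (pv : List Int) (v u : Nat) : Prop := u = v ∨ pvStrict pv v u

def pvKids (pv : List Int) (v : Nat) : List Nat :=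
  (List.range pv.length).filter (fun c => pvNp pv c = v)

-- number of rooted proper descendants of v
def pvCnt (pv : List Int) (v : Nat) : Nat :=
  ((Finset.range pv.length).filter (fun q => pvRooted pv q ∧ pvStrict pv v q)).card

-- abbreviation for the precondition as used by the lemmas
def pvPre (pv : List Int) : Prop := ∀ p ∈ pv, -((pv.length : Int) + 1) ≤ p ∧ p ≤ (pv.length : Int)

-- ---------- basic facts ----------

lemma pvNorm_le (pv : List Int) (p : Int) (h1 : -((pv.length : Int) + 1) ≤ p) (h2 : p ≤ (pv.length : Int)) :
    pvNorm pv p ≤ pv.length := by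
  unfold pvNorm; split <;> omega

lemma pvNp_le (pv : List Int) (hpre : pvPre pv) (q : Nat) : pvNp pv q ≤ pv.length := by
  unfold pvNp
  split
  · rename_i h
    exact pvNorm_le pv _ (hpre _ (pv.getElem_mem h)).1 (hpre _ (pv.getElem_mem h)).2
  · exact le_refl _

lemma pvNp_root (pv : List Int) : pvNp pv pv.length = pv.length := by
  unfold pvNp; split <;> omega

lemma pvIter_le (pv : List Int) (hpre : pvPre pv) (k q : Nat) (hq : q ≤ pv.length) :
    pvIter pv k q ≤ pv.length := by
  induction k generalizing q with
  | zero => exact hq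
  | succ k ih =>
    unfold pvIter at *
    rw [Function.iterate_succ_apply]
    exact ih _ (pvNp_le pv hpre q)

lemma pvIter_succ (pv : List Int) (k q : Nat) : pvIter pv (k + 1) q = pvIter pv k (pvNp pv q) := by
  unfold pvIter; rw [Function.iterate_succ_apply]

lemma pvIter_zero (pv : List Int) (q : Nat) : pvIter pv 0 q = q := rfl

lemma pvIter_succ' (pv : List Int) (k q : Nat) : pvIter pv (k + 1) q = pvNp pv (pvIter pv k q) := by
  unfold pvIter; rw [Function.iterate_succ_apply']

lemma pvIter_add (pv : List Int) (j k q : Nat) : pvIter pv (j + k) q = pvIter pv j (pvIter pv k q) := by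
  unfold pvIter; rw [Function.iterate_add_apply]

lemma pvIter_root (pv : List Int) (k : Nat) : pvIter pv k pv.length = pv.length := by
  induction k with
  | zero => rfl
  | succ k ih => rw [pvIter_succ, pvNp_root]; exact ih

lemma pvIter_fix (pv : List Int) {m m' q : Nat} (h : pvIter pv m q = pv.length) (hmm : m ≤ m') :
    pvIter pv m' q = pv.length := by
  obtain ⟨j, rfl⟩ := Nat.exists_eq_add_of_le hmm
  rw [Nat.add_comm, pvIter_add, h, pvIter_root]

-- ---------- depth ----------

lemma pvDepth_spec (pv : List Int) {q : Nat} (h : pvRooted pv q) :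
    pvIter pv (pvDepth pv q) q = pv.length := by
  unfold pvDepth
  rw [dif_pos h]
  exact Nat.find_spec (⟨pv.length + 1, h⟩ : ∃ k, pvIter pv k q = pv.length)

lemma pvDepth_min (pv : List Int) {q k : Nat} (h : pvRooted pv q) (hk : k < pvDepth pv q) :
    pvIter pv k q ≠ pv.length := by
  unfold pvDepth at hk
  rw [dif_pos h] at hk
  exact Nat.find_min (⟨pv.length + 1, h⟩ : ∃ k, pvIter pv k q = pv.length) hk

-- the chain below the first hit of the root is injective
lemma pvIter_inj (pv : List Int) {q i j : Nat} (h : pvRooted pv q)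
    (hij : i < j) (hj : j ≤ pvDepth pv q) : pvIter pv i q ≠ pvIter pv j q := by
  intro heq
  have hd : pvIter pv (i + (pvDepth pv q - j)) q = pv.length := by
    rw [Nat.add_comm, pvIter_add, heq, ← pvIter_add]
    have : pvDepth pv q - j + j = pvDepth pv q := Nat.sub_add_cancel hj
    rw [this]
    exact pvDepth_spec pv h
  exact pvDepth_min pv h (by omega) hd

lemma pvDepth_le_iter (pv : List Int) {q k : Nat} (h : pvRooted pv q)
    (hk : pvIter pv k q = pv.length) : pvDepth pv q ≤ k := by
  unfold pvDepth
  rw [dif_pos h]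
  exact Nat.find_min' _ hk

-- pigeonhole: the chain from q collides within pv.length + 1 steps
lemma pvCollision (pv : List Int) (hpre : pvPre pv) {q : Nat} (hq : q ≤ pv.length) :
    ∃ i j, i < j ∧ j ≤ pv.length + 1 ∧ pvIter pv i q = pvIter pv j q := by
  have hmaps : ∀ a ∈ Finset.range (pv.length + 2), pvIter pv a q ∈ Finset.range (pv.length + 1) := by
    intro a _
    rw [Finset.mem_range]
    have := pvIter_le pv hpre a q hq
    omega
  have hcard : (Finset.range (pv.length + 1)).card < (Finset.range (pv.length + 2)).card := by
    simp
  obtain ⟨x, hx, y, hy, hne, heq⟩ :=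
    Finset.exists_ne_map_eq_of_card_lt_of_maps_to hcard hmaps
  rw [Finset.mem_range] at hx hy
  rcases Nat.lt_or_ge x y with hlt | hge
  · exact ⟨x, y, hlt, by omega, heq⟩
  · exact ⟨y, x, by omega, by omega, heq.symm⟩

lemma pvDepth_le (pv : List Int) (hpre : pvPre pv) {q : Nat} (hq : q ≤ pv.length) (h : pvRooted pv q) :
    pvDepth pv q ≤ pv.length := by
  by_contra hgt
  obtain ⟨i, j, hij, hj, heq⟩ := pvCollision pv hpre hq
  exact pvIter_inj pv h hij (by omega) heq

lemma pvLt_depth (pv : List Int) {q j : Nat} (h : pvRooted pv q)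
    (hj : pvIter pv j q ≠ pv.length) : j < pvDepth pv q := by
  by_contra hge
  exact hj (pvIter_fix pv (pvDepth_spec pv h) (by omega))

-- the first hit of any target value happens within pv.length steps
lemma pvFind_le (pv : List Int) (hpre : pvPre pv) {u t : Nat} (hu : u ≤ pv.length)
    (h : ∃ k, pvIter pv k u = t) : Nat.find h ≤ pv.length := by
  set K := Nat.find h with hK
  have hspec : pvIter pv K u = t := Nat.find_spec h
  by_contra hgt
  -- the chain prefix 0 .. K would be injective, too many distinct values
  have hinj : ∀ i j, i < j → j ≤ K → pvIter pv i u ≠ pvIter pv j u := by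
    intro i j hij hj heq
    have hd : pvIter pv (K - j + i) u = t := by
      rw [pvIter_add, heq, ← pvIter_add, Nat.sub_add_cancel hj]
      exact hspec
    have := Nat.find_min h (m := K - j + i) (by omega)
    exact this hd
  obtain ⟨i, j, hij, hj, heq⟩ := pvCollision pv hpre hu
  exact hinj i j hij (by omega) heq

lemma pvRooted_of_iter (pv : List Int) (hpre : pvPre pv) {q m : Nat} (hq : q ≤ pv.length)
    (h : pvIter pv m q = pv.length) : pvRooted pv q := by
  obtain ⟨i, j, hij, hj, heq⟩ := pvCollision pv hpre hq
  -- from the collision, any hit of the root can be pushed below pv.length + 2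
  have key : ∀ m, pvIter pv m q = pv.length → ∃ m' ≤ pv.length + 1, pvIter pv m' q = pv.length := by
    intro m
    induction m using Nat.strong_induction_on with
    | _ m ih =>
      intro hm
      rcases le_or_gt m (pv.length + 1) with hle | hgt
      · exact ⟨m, hle, hm⟩
      · have hjm : j ≤ m := by omega
        have hstep : pvIter pv (m - j + i) q = pv.length := by
          rw [pvIter_add, heq, ← pvIter_add, Nat.sub_add_cancel hjm]
          exact hm
        obtain ⟨m', hm', h'⟩ := ih (m - j + i) (by omega) hstep
        exact ⟨m', hm', h'⟩
  obtain ⟨m', hm', h'⟩ := key m h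
  exact pvIter_fix pv h' hm'

lemma pvRooted_root (pv : List Int) : pvRooted pv pv.length := pvIter_root pv _

lemma pvDepth_root (pv : List Int) : pvDepth pv pv.length = 0 := by
  unfold pvDepth
  rw [dif_pos (pvRooted_root pv)]
  exact (Nat.find_eq_zero _).mpr rfl

lemma pvDepth_pos (pv : List Int) {q : Nat} (h : pvRooted pv q) (hne : q ≠ pv.length) :
    1 ≤ pvDepth pv q := by
  have := pvLt_depth pv h (j := 0) hne
  omega

-- a child of a rooted node is rooted, one level deeper
lemma pvRooted_child (pv : List Int) (hpre : pvPre pv) {v c : Nat} (hv : pvRooted pv v)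
    (hc : c < pv.length) (hcv : pvNp pv c = v) : pvRooted pv c := by
  have : pvIter pv (pv.length + 1 + 1) c = pv.length := by
    rw [pvIter_add pv (pv.length + 1) 1 c]
    have h1 : pvIter pv 1 c = v := by rw [pvIter_succ, pvIter_zero]; exact hcv
    rw [h1]
    exact hv
  exact pvRooted_of_iter pv hpre (by omega) this

lemma pvDepth_child (pv : List Int) (hpre : pvPre pv) {v c : Nat} (hv : v ≤ pv.length)
    (hvr : pvRooted pv v) (hc : c < pv.length) (hcv : pvNp pv c = v) :
    pvDepth pv c = pvDepth pv v + 1 := by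
  have hrc : pvRooted pv c := pvRooted_child pv hpre hvr hc hcv
  have hle : pvDepth pv c ≤ pvDepth pv v + 1 := by
    apply pvDepth_le_iter pv hrc
    rw [pvIter_succ, hcv]
    exact pvDepth_spec pv hvr
  have hge : pvDepth pv v + 1 ≤ pvDepth pv c := by
    have h1 : 1 ≤ pvDepth pv c := pvDepth_pos pv hrc (by omega)
    have h2 : pvIter pv (pvDepth pv c - 1) v = pv.length := by
      have : pvIter pv (pvDepth pv c - 1 + 1) c = pv.length := by
        rw [Nat.sub_add_cancel h1]
        exact pvDepth_spec pv hrc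
      rw [pvIter_succ, hcv] at this
      exact this
    have := pvDepth_le_iter pv hvr h2
    omega
  omega

-- ---------- subtree predicates ----------

lemma pvStrict_of_np (pv : List Int) {v c : Nat} (hc : c < pv.length) (hcv : pvNp pv c = v) :
    pvStrict pv v c := by
  refine ⟨1, by simp, ?_⟩
  rw [pvIter_succ, pvIter_zero]
  exact hcv

-- going one step up preserves proper descendance
lemma pvStrict_step (pv : List Int) (hpre : pvPre pv) {v c u : Nat} (hu : u ≤ pv.length)
    (hc : c < pv.length) (hcv : pvNp pv c = v) (h : pvInSub pv c u) : pvStrict pv v u := by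
  rcases h with rfl | ⟨k, hk, hit⟩
  · exact pvStrict_of_np pv hc hcv
  · -- take the FIRST hit of c on u's chain; it is within pv.length steps
    have hex : ∃ k, pvIter pv k u = c := ⟨k, hit⟩
    have hKle : Nat.find hex ≤ pv.length := pvFind_le pv hpre hu hex
    refine ⟨Nat.find hex + 1, ?_, ?_⟩
    · simp only [Finset.mem_Icc]; omega
    · rw [pvIter_succ', Nat.find_spec hex]
      exact hcv

lemma pvRooted_of_strict (pv : List Int) (hpre : pvPre pv) {v u : Nat} (hu : u ≤ pv.length)
    (hv : pvRooted pv v) (h : pvStrict pv v u) : pvRooted pv u := by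
  obtain ⟨k, _, hit⟩ := h
  have : pvIter pv (pvDepth pv v + k) u = pv.length := by
    rw [pvIter_add, hit]
    exact pvDepth_spec pv hv
  exact pvRooted_of_iter pv hpre hu this

lemma pvStrict_irrefl (pv : List Int) {v : Nat} (hv : v < pv.length) (hr : pvRooted pv v) :
    ¬ pvStrict pv v v := by
  rintro ⟨k, hk, hit⟩
  rw [Finset.mem_Icc] at hk
  have hkd : k < pvDepth pv v := pvLt_depth pv hr (by rw [hit]; omega)
  exact pvIter_inj pv hr (i := 0) (j := k) (by omega) (by omega) (by rw [pvIter_zero, hit])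

-- a rooted node is not in the subtree of any of its children
lemma pv_not_inSub_child (pv : List Int) (hpre : pvPre pv) {v c : Nat} (hv : v ≤ pv.length)
    (hr : pvRooted pv v) (hc : c < pv.length) (hcv : pvNp pv c = v) : ¬ pvInSub pv c v := by
  rintro (heq | ⟨k, hk, hit⟩)
  · -- v = c would be its own parent
    have h1 : 1 ≤ pvDepth pv v := pvDepth_pos pv hr (by omega)
    refine pvIter_inj pv hr (i := 0) (j := 1) (by omega) (by omega) ?_
    rw [pvIter_zero, pvIter_succ, pvIter_zero, heq]
    rw [heq] at hcv
    exact hcv.symm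
  · -- v would lie on a cycle through c
    have hvn : v ≠ pv.length := by
      intro rfl
      have := pvIter_le pv hpre k pv.length (le_refl _)
      rw [pvIter_root] at hit
      omega
    have hself : pvIter pv (k + 1) v = v := by
      rw [pvIter_succ', hit, hcv]
    have hkd : k + 1 < pvDepth pv v := pvLt_depth pv hr (by rw [hself]; omega)
    exact pvIter_inj pv hr (i := 0) (j := k + 1) (by omega) (by omega)
      (by rw [pvIter_zero, hself])

-- subtrees of two distinct children of the same rooted node are disjoint
lemma pv_pos_of_inSub (pv : List Int) (hpre : pvPre pv) {c u : Nat} (hu : u ≤ pv.length)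
    (hrc : pvRooted pv c) (hc : c < pv.length) (h : pvInSub pv c u) :
    pvRooted pv u ∧ ∃ i, i < pvDepth pv u ∧ pvIter pv i u = c := by
  rcases h with heq | ⟨k, hk, hit⟩
  · subst heq
    exact ⟨hrc, 0, pvDepth_pos pv hrc (by omega), pvIter_zero pv u⟩
  · have hru : pvRooted pv u := pvRooted_of_strict pv hpre hu hrc ⟨k, hk, hit⟩
    exact ⟨hru, k, pvLt_depth pv hru (by rw [hit]; omega), hit⟩

lemma pv_sub_disjoint (pv : List Int) (hpre : pvPre pv) {v c₁ c₂ u : Nat} (hu : u ≤ pv.length)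
    (hv : pvRooted pv v) (hc₁ : c₁ < pv.length) (hc₂ : c₂ < pv.length) (hne : c₁ ≠ c₂)
    (h₁ : pvNp pv c₁ = v) (h₂ : pvNp pv c₂ = v) (hu₁ : pvInSub pv c₁ u) (hu₂ : pvInSub pv c₂ u) :
    False := by
  have hr₁ : pvRooted pv c₁ := pvRooted_child pv hpre hv hc₁ h₁
  have hr₂ : pvRooted pv c₂ := pvRooted_child pv hpre hv hc₂ h₂
  obtain ⟨hru, i₁, hi₁, hio₁⟩ := pv_pos_of_inSub pv hpre hu hr₁ hc₁ hu₁
  obtain ⟨-, i₂, hi₂, hio₂⟩ := pv_pos_of_inSub pv hpre hu hr₂ hc₂ hu₂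
  have hne' : i₁ ≠ i₂ := by
    intro rfl
    exact hne (hio₁.symm.trans hio₂)
  have heq : pvIter pv (i₁ + 1) u = pvIter pv (i₂ + 1) u := by
    rw [pvIter_succ', pvIter_succ', hio₁, hio₂, h₁, h₂]
  rcases Nat.lt_or_ge i₁ i₂ with hlt | hge
  · exact pvIter_inj pv hru (by omega : i₁ + 1 < i₂ + 1) (by omega) heq
  · exact pvIter_inj pv hru (by omega : i₂ + 1 < i₁ + 1) (by omega) heq.symm

-- a proper descendant comes through some child
lemma pv_strict_through_kid (pv : List Int) (hpre : pvPre pv) {v u : Nat} (hu : u ≤ pv.length)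
    (hne : u ≠ v) (h : pvStrict pv v u) : ∃ c ∈ pvKids pv v, pvInSub pv c u := by
  obtain ⟨k₀, hk₀, hit₀⟩ := h
  have hex : ∃ k, pvIter pv k u = v := ⟨k₀, hit₀⟩
  set K := Nat.find hex with hKdef
  have hspec : pvIter pv K u = v := Nat.find_spec hex
  have hK1 : 1 ≤ K := by
    rcases Nat.eq_zero_or_pos K with h0 | h1
    · rw [h0, pvIter_zero] at hspec; exact absurd hspec hne
    · exact h1
  have hKle : K ≤ pv.length := pvFind_le pv hpre hu hex
  set c := pvIter pv (K - 1) u with hcdef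
  have hcnp : pvNp pv c = v := by
    rw [← hspec, hcdef]
    conv_rhs => rw [show K = K - 1 + 1 by omega, pvIter_succ']
  have hcle : c ≤ pv.length := pvIter_le pv hpre _ u hu
  have hclt : c < pv.length := by
    rcases Nat.lt_or_ge c pv.length with h | h
    · exact h
    · exfalso
      have hcn : c = pv.length := by omega
      have hvn : v = pv.length := by rw [← hcnp, hcn, pvNp_root]
      have : pvIter pv (K - 1) u = v := by rw [← hcdef] at *; rw [hcn, hvn]
      exact Nat.find_min hex (by omega : K - 1 < K) this
  refine ⟨c, ?_, ?_⟩
  · unfold pvKids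
    rw [List.mem_filter, List.mem_range]
    exact ⟨hclt, by simp [hcnp]⟩
  · rcases Nat.eq_or_lt_of_le hK1 with h1 | h1
    · left
      have h0 : K - 1 = 0 := by omega
      rw [hcdef, h0, pvIter_zero]
    · right
      exact ⟨K - 1, by rw [Finset.mem_Icc]; omega, hcdef.symm⟩

-- the counting recurrence: descendants of v = the children plus their descendants
lemma pvKids_nodup (pv : List Int) (v : Nat) : (pvKids pv v).Nodup :=
  (List.nodup_range).filter _

lemma pvKids_mem (pv : List Int) (v c : Nat) :
    c ∈ pvKids pv v ↔ c < pv.length ∧ pvNp pv c = v := by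
  unfold pvKids
  rw [List.mem_filter, List.mem_range]
  simp

lemma pvCnt_rec (pv : List Int) (hpre : pvPre pv) {v : Nat} (hv : v ≤ pv.length)
    (hr : pvRooted pv v) :
    pvCnt pv v = ((pvKids pv v).map (fun c => pvCnt pv c + 1)).sum := by
  classical
  have hpart : (Finset.range pv.length).filter (fun q => pvRooted pv q ∧ pvStrict pv v q) =
      (pvKids pv v).toFinset.biUnion (fun c =>
        insert c ((Finset.range pv.length).filter (fun q => pvRooted pv q ∧ pvStrict pv c q))) := by
    ext q
    simp only [Finset.mem_filter, Finset.mem_range, Finset.mem_biUnion, List.mem_toFinset,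
      Finset.mem_insert]
    constructor
    · rintro ⟨hq, hrq, hst⟩
      have hqv : q ≠ v := by
        rintro rfl
        exact pvStrict_irrefl pv hq hrq hst
      obtain ⟨c, hc, hin⟩ := pv_strict_through_kid pv hpre (by omega) hqv hst
      rcases hin with rfl | hstc
      · exact ⟨q, hc, Or.inl rfl⟩
      · exact ⟨c, hc, Or.inr ⟨hq, hrq, hstc⟩⟩
    · rintro ⟨c, hc, hin⟩
      rw [pvKids_mem] at hc
      obtain ⟨hclt, hcnp⟩ := hc
      have hrc : pvRooted pv c := pvRooted_child pv hpre hr hclt hcnp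
      rcases hin with rfl | ⟨hq, hrq, hstc⟩
      · exact ⟨hclt, hrc, pvStrict_of_np pv hclt hcnp⟩
      · exact ⟨hq, hrq, pvStrict_step pv hpre (by omega) hclt hcnp (Or.inr hstc)⟩
  unfold pvCnt
  rw [hpart, Finset.card_biUnion]
  · have hins : ∀ c ∈ (pvKids pv v).toFinset,
        (insert c ((Finset.range pv.length).filter
          (fun q => pvRooted pv q ∧ pvStrict pv c q))).card = pvCnt pv c + 1 := by
      intro c hc
      rw [List.mem_toFinset, pvKids_mem] at hc
      obtain ⟨hclt, hcnp⟩ := hc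
      have hrc : pvRooted pv c := pvRooted_child pv hpre hr hclt hcnp
      rw [Finset.card_insert_of_notMem, pvCnt]
      rintro hmem
      rw [Finset.mem_filter] at hmem
      exact pvStrict_irrefl pv hclt hrc hmem.2.2
    rw [Finset.sum_congr rfl hins]
    exact List.sum_toFinset _ (pvKids_nodup pv v)
  · intro c₁ h₁ c₂ h₂ hne
    rw [Finset.mem_coe, List.mem_toFinset, pvKids_mem] at h₁ h₂
    simp only [Function.onFun]
    rw [Finset.disjoint_left]
    intro u hu₁ hu₂
    simp only [Finset.mem_insert, Finset.mem_filter, Finset.mem_range] at hu₁ hu₂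
    have hun : u ≤ pv.length := by
      rcases hu₁ with rfl | ⟨h, _⟩ <;> omega
    have hin₁ : pvInSub pv c₁ u := by
      rcases hu₁ with rfl | ⟨_, _, h⟩
      · exact Or.inl rfl
      · exact Or.inr h
    have hin₂ : pvInSub pv c₂ u := by
      rcases hu₂ with rfl | ⟨_, _, h⟩
      · exact Or.inl rfl
      · exact Or.inr h
    exact absurd (pv_sub_disjoint pv hpre hun hr h₁.1 h₂.1 hne h₁.2 h₂.2 hin₁ hin₂) (by simp)

-- ---------- index wrapping ----------

lemma pyIdx_wrap (pv : List Int) (L : Nat) (hL : L = pv.length + 1)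
    (p : Int) (h1 : -((pv.length : Int) + 1) ≤ p) (h2 : p ≤ (pv.length : Int)) :
    PySem.List.pyIdx? L p = some (pvNorm pv p) := by
  subst hL
  unfold PySem.List.pyIdx? pvNorm
  split
  · rw [if_pos (by push_cast; omega)]
    congr 1
    omega
  · rw [if_pos (by push_cast; omega)]
    congr 1
    omega

lemma pvNorm_lt (pv : List Int) (p : Int) (h1 : -((pv.length : Int) + 1) ≤ p)
    (h2 : p ≤ (pv.length : Int)) : pvNorm pv p < pv.length + 1 := by
  have := pvNorm_le pv p h1 h2
  omega

lemma pyGetD_wrap {α : Type} (pv : List Int) (xs : List α) (hxs : xs.length = pv.length + 1)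
    (p : Int) (h1 : -((pv.length : Int) + 1) ≤ p) (h2 : p ≤ (pv.length : Int)) (d : α) :
    PySem.List.pyGetD xs p d = xs.getD (pvNorm pv p) d := by
  unfold PySem.List.pyGetD PySem.List.pyGet?
  rw [hxs, pyIdx_wrap pv _ rfl p h1 h2]
  have hlt := pvNorm_lt pv p h1 h2
  rw [show ((some (pvNorm pv p)).bind fun k => xs[k]?) = xs[pvNorm pv p]? from rfl]
  rw [List.getD_eq_getElem xs d (by omega), List.getElem?_eq_getElem (by omega)]
  rfl

lemma pySetD_wrap {α : Type} (pv : List Int) (xs : List α) (hxs : xs.length = pv.length + 1)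
    (p : Int) (h1 : -((pv.length : Int) + 1) ≤ p) (h2 : p ≤ (pv.length : Int)) (v : α) :
    PySem.List.pySetD xs p v = xs.set (pvNorm pv p) v := by
  unfold PySem.List.pySetD PySem.List.pySet?
  rw [hxs, pyIdx_wrap pv _ rfl p h1 h2, Option.map_some, Option.getD_some]

-- the common [x for v in range(n+1)] initial table
lemma initTable_eq {α : Type} (pv : List Int) (x : α) :
    (PySem.List.pyRange 0 ((pv.length : Int) + 1) 1).map (fun _ => x) =
      List.replicate (pv.length + 1) x := by
  rw [List.eq_replicate_iff]
  constructor
  · rw [List.length_map, PySem.List.length_pyRange_one]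
    omega
  · intro b hb
    rw [List.mem_map] at hb
    obtain ⟨_, _, rfl⟩ := hb
    rfl

-- ---------- the children table ----------

lemma p2cChildren_partial (pv : List Int) (hpre : pvPre pv) (m : Nat) (hm : m ≤ pv.length) :
    (((List.range m).map (fun (q : Nat) => (q : Int))).foldl
      (fun ch q =>
        let p := PySem.List.pyGetD pv q 0
        PySem.List.pySetD ch p (PySem.List.pyGetD ch p [] ++ [q]))
      (List.replicate (pv.length + 1) ([] : List Int))).length = pv.length + 1 ∧
    ∀ v < pv.length + 1,
      (((List.range m).map (fun (q : Nat) => (q : Int))).foldl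
        (fun ch q =>
          let p := PySem.List.pyGetD pv q 0
          PySem.List.pySetD ch p (PySem.List.pyGetD ch p [] ++ [q]))
        (List.replicate (pv.length + 1) ([] : List Int))).getD v [] =
        ((List.range m).filter (fun c => pvNp pv c = v)).map (fun (c : Nat) => (c : Int)) := by
  induction m with
  | zero =>
    refine ⟨by simp, ?_⟩
    intro v hv
    simp only [List.range_zero, List.map_nil, List.foldl_nil, List.filter_nil]
    rw [List.getD_replicate _ hv]
  | succ m ih =>
    obtain ⟨ihlen, ihget⟩ := ih (by omega)
    set T := ((List.range m).map (fun (q : Nat) => (q : Int))).foldl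
      (fun ch q =>
        let p := PySem.List.pyGetD pv q 0
        PySem.List.pySetD ch p (PySem.List.pyGetD ch p [] ++ [q]))
      (List.replicate (pv.length + 1) ([] : List Int)) with hT
    have hmlen : m < pv.length := by omega
    have hpm : PySem.List.pyGetD pv (m : Int) 0 = pv[m] := by
      rw [PySem.List.pyGetD_natCast, List.getD_eq_getElem pv 0 hmlen]
    have hb1 : -((pv.length : Int) + 1) ≤ pv[m] := (hpre _ (pv.getElem_mem hmlen)).1
    have hb2 : pv[m] ≤ (pv.length : Int) := (hpre _ (pv.getElem_mem hmlen)).2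
    have hnorm : pvNorm pv pv[m] = pvNp pv m := by
      unfold pvNp
      rw [dif_pos hmlen]
    have hstep : ∀ (ch : List (List Int)), ch.length = pv.length + 1 →
        (let p := PySem.List.pyGetD pv (m : Int) 0
         PySem.List.pySetD ch p (PySem.List.pyGetD ch p [] ++ [(m : Int)])) =
        ch.set (pvNp pv m) (ch.getD (pvNp pv m) [] ++ [(m : Int)]) := by
      intro ch hch
      simp only [hpm]
      rw [pyGetD_wrap pv ch hch _ hb1 hb2, pySetD_wrap pv ch hch _ hb1 hb2, hnorm]
    have hsplit : (List.range (m + 1)).map (fun (q : Nat) => (q : Int)) =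
        (List.range m).map (fun (q : Nat) => (q : Int)) ++ [(m : Int)] := by
      rw [List.range_succ, List.map_append]
      rfl
    rw [hsplit, List.foldl_append]
    simp only [List.foldl_cons, List.foldl_nil, ← hT]
    rw [hstep T ihlen]
    have hnp_le : pvNp pv m < pv.length + 1 := by
      have := pvNp_le pv hpre m
      omega
    constructor
    · rw [List.length_set]
      exact ihlen
    · intro v hv
      rw [List.getD_eq_getElem _ _ (by rw [List.length_set, ihlen]; omega),
        List.getElem_set, List.range_succ, List.filter_append, List.map_append]
      by_cases hvm : pvNp pv m = v
      · rw [if_pos hvm, hvm, ihget v hv]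
        congr 1
        simp [hvm]
      · rw [if_neg hvm]
        rw [← List.getD_eq_getElem _ ([] : List Int) (by rw [ihlen]; omega), ihget v hv]
        have hnil : (List.filter (fun c => decide (pvNp pv c = v)) [m]) = [] := by
          simp [hvm]
        rw [hnil, List.map_nil, List.append_nil]

lemma p2cChildren_eq (pv : List Int) (hpre : pvPre pv) :
    (p2cChildren pv).length = pv.length + 1 ∧
    ∀ v < pv.length + 1, (p2cChildren pv).getD v [] = (pvKids pv v).map (fun (c : Nat) => (c : Int)) := by
  have h := p2cChildren_partial pv hpre pv.length (le_refl _)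
  unfold p2cChildren
  rw [initTable_eq, PySem.List.pyRange_zero_nat]
  exact h

-- ---------- the A side: the DFS computes pvCnt ----------

lemma castSum (pv : List Int) (cs : List Nat) :
    ((cs.map (fun c => (pvCnt pv c : Int) + 1)).sum) = (((cs.map (fun c => pvCnt pv c + 1)).sum : Nat) : Int) := by
  induction cs with
  | nil => simp
  | cons c cs ih =>
    simp only [List.map_cons, List.sum_cons, ih]
    push_cast
    ring

lemma dfs_spec (pv : List Int) (hpre : pvPre pv) :
    ∀ (fuel : Nat) (v : Nat) (s : List Int), v ≤ pv.length → pvRooted pv v →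
    pv.length + 2 ≤ pvDepth pv v + fuel → s.length = pv.length + 1 →
    (∀ u, u < pv.length + 1 → pvInSub pv v u → s.getD u 0 = 0) →
    (subtreeSizeRec (p2cChildren pv) fuel (v : Int) s).1.length = pv.length + 1 ∧
    (∀ u, u < pv.length + 1 →
      (subtreeSizeRec (p2cChildren pv) fuel (v : Int) s).1.getD u 0 =
        if pvInSub pv v u then (pvCnt pv u : Int) else s.getD u 0) ∧
    (subtreeSizeRec (p2cChildren pv) fuel (v : Int) s).2 = (pvCnt pv v : Int) + 1 := by
  intro fuel
  induction fuel with
  | zero =>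
    intro v s hv hr hfuel hs hzero
    exfalso
    have := pvDepth_le pv hpre hv hr
    omega
  | succ fuel IH =>
    intro v s hv hr hfuel hs hzero
    have hkid : PySem.List.pyGetD (p2cChildren pv) (v : Int) [] =
        (pvKids pv v).map (fun (c : Nat) => (c : Int)) := by
      rw [PySem.List.pyGetD_natCast]
      exact (p2cChildren_eq pv hpre).2 v (by omega)
    -- the inner fold over a suffix of the children list
    have hfold : ∀ (cs : List Nat) (t : List Int),
        (∀ c ∈ cs, c < pv.length ∧ pvNp pv c = v) → cs.Nodup →
        t.length = pv.length + 1 →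
        (∀ u, u < pv.length + 1 → (∃ c ∈ cs, pvInSub pv c u) → t.getD u 0 = 0) →
        ((cs.map (fun (c : Nat) => (c : Int))).foldl
          (fun s child =>
            PySem.List.pySetD (subtreeSizeRec (p2cChildren pv) fuel child s).1 (v : Int)
              (PySem.List.pyGetD s (v : Int) 0 +
                (subtreeSizeRec (p2cChildren pv) fuel child s).2)) t).length = pv.length + 1 ∧
        ∀ u, u < pv.length + 1 →
          ((cs.map (fun (c : Nat) => (c : Int))).foldl
            (fun s child =>
              PySem.List.pySetD (subtreeSizeRec (p2cChildren pv) fuel child s).1 (v : Int)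
                (PySem.List.pyGetD s (v : Int) 0 +
                  (subtreeSizeRec (p2cChildren pv) fuel child s).2)) t).getD u 0 =
          if ∃ c ∈ cs, pvInSub pv c u then (pvCnt pv u : Int)
          else if u = v then t.getD u 0 + ((cs.map (fun c => (pvCnt pv c : Int) + 1)).sum)
          else t.getD u 0 := by
      intro cs
      induction cs with
      | nil =>
        intro t hcs hnd ht hzt
        refine ⟨ht, ?_⟩
        intro u hu
        simp only [List.map_nil, List.foldl_nil, List.sum_nil, add_zero]
        rw [if_neg (by simp)]
        split <;> rfl
      | cons c cs ihc =>
        intro t hcs hnd ht hzt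
        obtain ⟨hclt, hcnp⟩ := hcs c (by simp)
        have hrc : pvRooted pv c := pvRooted_child pv hpre hr hclt hcnp
        have hdc : pvDepth pv c = pvDepth pv v + 1 := pvDepth_child pv hpre hv hr hclt hcnp
        obtain ⟨rlen, rget, rret⟩ := IH c t (by omega) hrc (by omega) ht
          (fun u hu hin => hzt u hu ⟨c, by simp, hin⟩)
        set r := subtreeSizeRec (p2cChildren pv) fuel (c : Int) t with hrdef
        have hnotv : ¬ pvInSub pv c v := pv_not_inSub_child pv hpre hv hr hclt hcnp
        -- the updated table after processing child c
        have hstep : PySem.List.pySetD (subtreeSizeRec (p2cChildren pv) fuel ((c : Nat) : Int) t).1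
              (v : Int) (PySem.List.pyGetD t (v : Int) 0 +
                (subtreeSizeRec (p2cChildren pv) fuel ((c : Nat) : Int) t).2) =
            r.1.set v (t.getD v 0 + ((pvCnt pv c : Int) + 1)) := by
          rw [← hrdef, rret, PySem.List.pySetD_natCast, PySem.List.pyGetD_natCast]
        rw [List.map_cons, List.foldl_cons, hstep]
        have hlen1 : (r.1.set v (t.getD v 0 + ((pvCnt pv c : Int) + 1))).length =
            pv.length + 1 := by
          rw [List.length_set]; exact rlen
        have hget1 : ∀ u, u < pv.length + 1 →
            (r.1.set v (t.getD v 0 + ((pvCnt pv c : Int) + 1))).getD u 0 =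
            if u = v then t.getD v 0 + ((pvCnt pv c : Int) + 1)
            else if pvInSub pv c u then (pvCnt pv u : Int) else t.getD u 0 := by
          intro u hu
          rw [List.getD_eq_getElem _ _ (by omega), List.getElem_set]
          by_cases huv : u = v
          · rw [if_pos huv.symm, if_pos huv]
          · rw [if_neg (fun h => huv h.symm), if_neg huv,
              ← List.getD_eq_getElem _ (0 : Int) (by omega)]
            exact rget u hu
        have htzero : ∀ u, u < pv.length + 1 → (∃ c' ∈ cs, pvInSub pv c' u) →
            (r.1.set v (t.getD v 0 + ((pvCnt pv c : Int) + 1))).getD u 0 = 0 := by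
          rintro u hu ⟨c', hc', hin'⟩
          rw [hget1 u hu]
          have hne' : c ≠ c' := by
            rintro rfl
            exact (List.nodup_cons.mp hnd).1 hc'
          obtain ⟨hclt', hcnp'⟩ := hcs c' (by simp [hc'])
          have hnv : u ≠ v := by
            rintro rfl
            exact pv_not_inSub_child pv hpre hv hr hclt' hcnp' hin'
          rw [if_neg hnv]
          have hnc : ¬ pvInSub pv c u := by
            intro hin
            exact pv_sub_disjoint pv hpre (by omega) hr hclt hclt' hne' hcnp hcnp' hin hin'
          rw [if_neg hnc]
          exact hzt u hu ⟨c', by simp [hc'], hin'⟩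
        obtain ⟨flen, fget⟩ := ihc (r.1.set v (t.getD v 0 + ((pvCnt pv c : Int) + 1)))
          (fun c' hc' => hcs c' (by simp [hc'])) (List.nodup_cons.mp hnd).2 hlen1 htzero
        refine ⟨flen, ?_⟩
        intro u hu
        rw [fget u hu]
        by_cases hincs : ∃ c' ∈ cs, pvInSub pv c' u
        · rw [if_pos hincs, if_pos (by obtain ⟨c', h1, h2⟩ := hincs; exact ⟨c', by simp [h1], h2⟩)]
        · rw [if_neg hincs]
          by_cases huv : u = v
          · subst huv
            rw [if_pos rfl, hget1 u hu, if_pos rfl]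
            have hnone : ¬ ∃ c' ∈ (c :: cs : List Nat), pvInSub pv c' u := by
              rintro ⟨c', hc', hin'⟩
              rw [List.mem_cons] at hc'
              rcases hc' with rfl | hc'
              · exact hnotv hin'
              · obtain ⟨hclt', hcnp'⟩ := hcs c' (by simp [hc'])
                exact pv_not_inSub_child pv hpre hv hr hclt' hcnp' hin'
            rw [if_neg hnone, if_pos rfl]
            simp only [List.map_cons, List.sum_cons]
            ring
          · rw [if_neg huv, hget1 u hu, if_neg huv]
            by_cases hinc : pvInSub pv c u
            · rw [if_pos hinc, if_pos ⟨c, by simp, hinc⟩]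
            · rw [if_neg hinc]
              have hnone : ¬ ∃ c' ∈ (c :: cs : List Nat), pvInSub pv c' u := by
                rintro ⟨c', hc', hin'⟩
                rw [List.mem_cons] at hc'
                rcases hc' with rfl | hc'
                · exact hinc hin'
                · exact hincs ⟨c', hc', hin'⟩
              rw [if_neg hnone, if_neg huv]
    -- the outer body of one DFS call
    simp only [subtreeSizeRec, hkid]
    by_cases hkids : pvKids pv v = []
    · -- leaf: subtree_sizes[v] = 0, return 1
      have hc0 : pvCnt pv v = 0 := by
        have := pvCnt_rec pv hpre hv hr
        rw [hkids] at this
        simpa using this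
      rw [hkids]
      simp only [List.map_nil, if_true]
      rw [PySem.List.pySetD_natCast]
      refine ⟨by rw [List.length_set]; exact hs, ?_, by simp [hc0]⟩
      intro u hu
      rw [List.getD_eq_getElem _ _ (by rw [List.length_set]; omega), List.getElem_set]
      by_cases huv : u = v
      · rw [if_pos huv.symm, if_pos (show pvInSub pv v u from Or.inl huv), huv, hc0]
        simp
      · rw [if_neg (fun h => huv h.symm), if_neg ?notin]
        case notin =>
          rintro (h | hst)
          · exact huv h
          · obtain ⟨k, hk, _⟩ := pv_strict_through_kid pv hpre (by omega) huv hst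
            rw [hkids] at hk
            exact absurd hk (List.not_mem_nil)
        exact (List.getD_eq_getElem s 0 (by omega)).symm
    · -- internal node: fold over the children, then read the accumulated count
      rw [if_neg (by simpa using hkids)]
      have hzfold : ∀ u, u < pv.length + 1 → (∃ c ∈ pvKids pv v, pvInSub pv c u) →
          s.getD u 0 = 0 := by
        rintro u hu ⟨c, hc, hin⟩
        obtain ⟨hclt, hcnp⟩ := (pvKids_mem pv v c).mp hc
        exact hzero u hu (Or.inr (pvStrict_step pv hpre (by omega) hclt hcnp hin))
      obtain ⟨flen, fget⟩ := hfold (pvKids pv v) s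
        (fun c hc => (pvKids_mem pv v c).mp hc) (pvKids_nodup pv v) hs hzfold
      have hval : ∀ u, u < pv.length + 1 →
          (((pvKids pv v).map (fun (c : Nat) => (c : Int))).foldl
            (fun s child =>
              PySem.List.pySetD (subtreeSizeRec (p2cChildren pv) fuel child s).1 (v : Int)
                (PySem.List.pyGetD s (v : Int) 0 +
                  (subtreeSizeRec (p2cChildren pv) fuel child s).2)) s).getD u 0 =
          if pvInSub pv v u then (pvCnt pv u : Int) else s.getD u 0 := by
        intro u hu
        rw [fget u hu]
        by_cases hex : ∃ c ∈ pvKids pv v, pvInSub pv c u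
        · rw [if_pos hex]
          obtain ⟨c, hc, hin⟩ := hex
          obtain ⟨hclt, hcnp⟩ := (pvKids_mem pv v c).mp hc
          rw [if_pos (show pvInSub pv v u from Or.inr (pvStrict_step pv hpre (by omega) hclt hcnp hin))]
        · rw [if_neg hex]
          by_cases huv : u = v
          · subst huv
            rw [if_pos rfl, if_pos (show pvInSub pv u u from Or.inl rfl), hzero u hu (Or.inl rfl)]
            rw [castSum, ← pvCnt_rec pv hpre hv hr]
            simp
          · rw [if_neg huv, if_neg ?noin]
            case noin =>
              rintro (h | hst)
              · exact huv h
              · exact hex (pv_strict_through_kid pv hpre (by omega) huv hst)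
      refine ⟨flen, hval, ?_⟩
      rw [PySem.List.pyGetD_natCast, hval v (by omega), if_pos (show pvInSub pv v v from Or.inl rfl)]

-- ---------- the B side: the explicit stack computes pvCnt ----------

-- the table "finalize subtree of v on top of s": pvCnt inside v's subtree, s elsewhere
def updSub (pv : List Int) (v : Nat) (s : List Int) : List Int :=
  (List.range (pv.length + 1)).map
    (fun u => if pvInSub pv v u then (pvCnt pv u : Int) else s.getD u 0)

lemma updSub_length (pv : List Int) (v : Nat) (s : List Int) :
    (updSub pv v s).length = pv.length + 1 := by
  unfold updSub
  rw [List.length_map, List.length_range]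

lemma updSub_getD (pv : List Int) (v : Nat) (s : List Int) {u : Nat} (hu : u < pv.length + 1) :
    (updSub pv v s).getD u 0 = if pvInSub pv v u then (pvCnt pv u : Int) else s.getD u 0 := by
  unfold updSub
  rw [List.getD_eq_getElem _ _ (by rw [List.length_map, List.length_range]; omega),
    List.getElem_map, List.getElem_range]

lemma natSum_mem_le : ∀ (l : List Nat), ∀ x ∈ l, x ≤ l.sum := by
  intro l
  induction l with
  | nil => intro x hx; exact absurd hx (List.not_mem_nil)
  | cons a l ih =>
    intro x hx
    rcases List.mem_cons.mp hx with rfl | h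
    · rw [List.sum_cons]; omega
    · have := ih x h
      rw [List.sum_cons]; omega

lemma pvCnt_le (pv : List Int) (v : Nat) : pvCnt pv v ≤ pv.length := by
  unfold pvCnt
  calc ((Finset.range pv.length).filter _).card
      ≤ (Finset.range pv.length).card := Finset.card_filter_le _ _
    _ = pv.length := Finset.card_range _

lemma pvKids_cnt_lt (pv : List Int) (hpre : pvPre pv) {v c : Nat} (hv : v ≤ pv.length)
    (hr : pvRooted pv v) (hc : c ∈ pvKids pv v) : pvCnt pv c + 1 ≤ pvCnt pv v := by
  have hrec := pvCnt_rec pv hpre hv hr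
  have hmem : pvCnt pv c + 1 ∈ (pvKids pv v).map (fun c => pvCnt pv c + 1) :=
    List.mem_map_of_mem hc
  rw [hrec]
  exact natSum_mem_le _ _ hmem

lemma pvKids_empty_of_cnt_zero (pv : List Int) (hpre : pvPre pv) {v : Nat}
    (hv : v ≤ pv.length) (hr : pvRooted pv v) (h0 : pvCnt pv v = 0) : pvKids pv v = [] := by
  cases hk : pvKids pv v with
  | nil => rfl
  | cons c cs =>
    exfalso
    have := pvKids_cnt_lt pv hpre hv hr (by rw [hk]; exact List.mem_cons_self)
    omega

lemma foldl_updSub_length (pv : List Int) : ∀ (cs : List Nat) (s : List Int),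
    s.length = pv.length + 1 →
    (cs.foldl (fun s c => updSub pv c s) s).length = pv.length + 1 := by
  intro cs
  induction cs with
  | nil => intro s hs; exact hs
  | cons c cs ih => intro s hs; exact ih _ (updSub_length pv c s)

lemma foldl_updSub_getD (pv : List Int) : ∀ (cs : List Nat) (s : List Int),
    s.length = pv.length + 1 → ∀ u, u < pv.length + 1 →
    (cs.foldl (fun s c => updSub pv c s) s).getD u 0 =
      if ∃ c ∈ cs, pvInSub pv c u then (pvCnt pv u : Int) else s.getD u 0 := by
  intro cs
  induction cs with
  | nil =>
    intro s hs u hu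
    rw [List.foldl_nil, if_neg (by simp)]
  | cons c cs ih =>
    intro s hs u hu
    rw [List.foldl_cons, ih _ (updSub_length pv c s) u hu]
    by_cases hcs : ∃ c' ∈ cs, pvInSub pv c' u
    · rw [if_pos hcs]
      obtain ⟨c', h1, h2⟩ := hcs
      rw [if_pos ⟨c', List.mem_cons_of_mem _ h1, h2⟩]
    · rw [if_neg hcs, updSub_getD pv c s hu]
      by_cases hc : pvInSub pv c u
      · rw [if_pos hc, if_pos ⟨c, List.mem_cons_self, hc⟩]
      · rw [if_neg hc, if_neg ?_]
        rintro ⟨c', hc', h⟩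
        rcases List.mem_cons.mp hc' with rfl | h2
        · exact hc h
        · exact hcs ⟨c', h2, h⟩

-- sum(subtree_sizes[c] + 1 for c in children[node]) once all child subtrees are finalized
lemma kidsum_eq (pv : List Int) (s' : List Int) : ∀ (cs : List Nat) (a : Int),
    (∀ c ∈ cs, PySem.List.pyGetD s' ((c : Nat) : Int) 0 = (pvCnt pv c : Int)) →
    ((cs.map (fun (c : Nat) => (c : Int))).foldl
        (fun acc c => acc + (PySem.List.pyGetD s' c 0 + 1)) a)
      = a + (((cs.map (fun c => pvCnt pv c + 1)).sum : Nat) : Int) := by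
  intro cs
  induction cs with
  | nil => intro a _; simp
  | cons c cs ih =>
    intro a hval
    rw [List.map_cons, List.foldl_cons, hval c List.mem_cons_self,
      ih _ (fun c' h => hval c' (List.mem_cons_of_mem _ h)), List.map_cons, List.sum_cons]
    push_cast
    ring

lemma stackLoop_nil (ch : List (List Int)) : ∀ (f : Nat) (s : List Int),
    stackLoop ch f [] s = s := by
  intro f s
  cases f <;> rfl

-- processing a whole list of unprocessed kid entries = folding the finalization
lemma stack_kids (pv : List Int) : ∀ (cs : List Nat),
    (∀ c ∈ cs, ∀ (fuel : Nat) (rest : List (Int × Bool)) (s : List Int),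
      s.length = pv.length + 1 →
      stackLoop (p2cChildren pv) (2 * (pvCnt pv c + 1) + fuel) (((c : Int), false) :: rest) s =
        stackLoop (p2cChildren pv) fuel rest (updSub pv c s)) →
    ∀ (fuel : Nat) (rest : List (Int × Bool)) (s : List Int), s.length = pv.length + 1 →
    stackLoop (p2cChildren pv) ((cs.map (fun c => 2 * (pvCnt pv c + 1))).sum + fuel)
      (cs.map (fun (c : Nat) => ((c : Int), false)) ++ rest) s =
      stackLoop (p2cChildren pv) fuel rest (cs.foldl (fun s c => updSub pv c s) s) := by
  intro cs
  induction cs with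
  | nil => intro _ fuel rest s _; simp
  | cons c cs ih =>
    intro hIH fuel rest s hs
    rw [List.map_cons, List.sum_cons, List.map_cons, List.cons_append,
      show 2 * (pvCnt pv c + 1) + (cs.map (fun c => 2 * (pvCnt pv c + 1))).sum + fuel =
        2 * (pvCnt pv c + 1) + ((cs.map (fun c => 2 * (pvCnt pv c + 1))).sum + fuel) by ring,
      hIH c List.mem_cons_self _ _ _ hs, List.foldl_cons]
    exact ih (fun c' h => hIH c' (List.mem_cons_of_mem _ h)) _ _ _ (updSub_length pv c s)

-- one full subtree, assuming the claim for each child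
lemma stack_body (pv : List Int) (hpre : pvPre pv) (v : Nat) (hv : v ≤ pv.length)
    (hr : pvRooted pv v)
    (IH : ∀ c ∈ pvKids pv v, ∀ (fuel : Nat) (rest : List (Int × Bool)) (s : List Int),
      s.length = pv.length + 1 →
      stackLoop (p2cChildren pv) (2 * (pvCnt pv c + 1) + fuel) (((c : Int), false) :: rest) s =
        stackLoop (p2cChildren pv) fuel rest (updSub pv c s)) :
    ∀ (fuel : Nat) (rest : List (Int × Bool)) (s : List Int), s.length = pv.length + 1 →
    stackLoop (p2cChildren pv) (2 * (pvCnt pv v + 1) + fuel) (((v : Int), false) :: rest) s =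
      stackLoop (p2cChildren pv) fuel rest (updSub pv v s) := by
  intro fuel rest s hs
  have hkid : PySem.List.pyGetD (p2cChildren pv) (v : Int) [] =
      (pvKids pv v).map (fun (c : Nat) => (c : Int)) := by
    rw [PySem.List.pyGetD_natCast]
    exact (p2cChildren_eq pv hpre).2 v (by omega)
  rw [show 2 * (pvCnt pv v + 1) + fuel = (2 * pvCnt pv v + 1 + fuel) + 1 by ring]
  simp only [stackLoop, Bool.false_eq_true, if_false, hkid]
  -- the pushed kid entries, top of stack = last child
  have hstack : (((pvKids pv v).map (fun (c : Nat) => (c : Int))).reverse.map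
        (fun c => (c, false))) =
      ((pvKids pv v).reverse.map (fun (c : Nat) => ((c : Int), false))) := by
    rw [← List.map_reverse, List.map_map]
    rfl
  have hsum : (((pvKids pv v).reverse.map (fun c => 2 * (pvCnt pv c + 1))).sum) =
      2 * pvCnt pv v := by
    rw [List.map_reverse, List.sum_reverse]
    have : ((pvKids pv v).map (fun c => 2 * (pvCnt pv c + 1))).sum =
        2 * ((pvKids pv v).map (fun c => pvCnt pv c + 1)).sum := by
      induction pvKids pv v with
      | nil => simp
      | cons c cs ihc => simp only [List.map_cons, List.sum_cons, ihc]; ring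
    rw [this, ← pvCnt_rec pv hpre hv hr]
  rw [hstack,
    show 2 * pvCnt pv v + 1 + fuel =
      (((pvKids pv v).reverse.map (fun c => 2 * (pvCnt pv c + 1))).sum) + (1 + fuel) by
        rw [hsum]; ring,
    stack_kids pv ((pvKids pv v).reverse)
      (fun c hc => IH c (List.mem_reverse.mp hc)) (1 + fuel) _ s hs]
  set s' := ((pvKids pv v).reverse).foldl (fun s c => updSub pv c s) s with hs'
  have hs'len : s'.length = pv.length + 1 := foldl_updSub_length pv _ s hs
  -- pop (v, True): write the sum of finalized child sizes
  rw [show 1 + fuel = fuel + 1 by ring]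
  simp only [stackLoop, if_pos, hkid]
  -- each kid's entry in s' is its descendant count
  have hval : ∀ c ∈ pvKids pv v, PySem.List.pyGetD s' ((c : Nat) : Int) 0 = (pvCnt pv c : Int) := by
    intro c hc
    have hclt : c < pv.length := ((pvKids_mem pv v c).mp hc).1
    rw [PySem.List.pyGetD_natCast, List.getD_eq_getElem _ _ (by omega),
      ← List.getD_eq_getElem _ (0 : Int) (by omega),
      foldl_updSub_getD pv _ s hs c (by omega),
      if_pos ⟨c, List.mem_reverse.mpr hc, Or.inl rfl⟩]
  have hsum2 : ((pvKids pv v).map (fun (c : Nat) => (c : Int))).foldl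
      (fun acc c => acc + (PySem.List.pyGetD s' c 0 + 1)) 0 = (pvCnt pv v : Int) := by
    rw [kidsum_eq pv s' (pvKids pv v) 0 hval, ← pvCnt_rec pv hpre hv hr]
    simp
  rw [hsum2, PySem.List.pySetD_natCast]
  -- the written table is exactly updSub pv v s
  have hfinal : s'.set v (pvCnt pv v : Int) = updSub pv v s := by
    apply List.ext_getElem
    · rw [List.length_set, hs'len, updSub_length]
    · intro u hu1 hu2
      have hu : u < pv.length + 1 := by rw [updSub_length] at hu2; exact hu2
      rw [List.getElem_set, ← List.getD_eq_getElem _ (0 : Int) hu2, updSub_getD pv v s hu]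
      by_cases huv : u = v
      · rw [if_pos huv.symm, if_pos (show pvInSub pv v u from Or.inl huv), huv]
      · rw [if_neg (fun h => huv h.symm), ← List.getD_eq_getElem _ (0 : Int) (by omega),
          foldl_updSub_getD pv _ s hs u hu]
        by_cases hst : pvStrict pv v u
        · obtain ⟨c, hc, hin⟩ := pv_strict_through_kid pv hpre (by omega) huv hst
          rw [if_pos ⟨c, List.mem_reverse.mpr hc, hin⟩,
            if_pos (show pvInSub pv v u from Or.inr hst)]
        · rw [if_neg ?_, if_neg (by rintro (h | h); exact huv h; exact hst h)]
          rintro ⟨c, hc, hin⟩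
          obtain ⟨hclt, hcnp⟩ := (pvKids_mem pv v c).mp (List.mem_reverse.mp hc)
          exact hst (pvStrict_step pv hpre (by omega) hclt hcnp hin)
  rw [hfinal]

lemma stack_spec (pv : List Int) (hpre : pvPre pv) : ∀ (N v : Nat), pvCnt pv v ≤ N →
    v ≤ pv.length → pvRooted pv v →
    ∀ (fuel : Nat) (rest : List (Int × Bool)) (s : List Int), s.length = pv.length + 1 →
    stackLoop (p2cChildren pv) (2 * (pvCnt pv v + 1) + fuel) (((v : Int), false) :: rest) s =
      stackLoop (p2cChildren pv) fuel rest (updSub pv v s) := by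
  intro N
  induction N with
  | zero =>
    intro v hN hv hr
    apply stack_body pv hpre v hv hr
    intro c hc
    rw [pvKids_empty_of_cnt_zero pv hpre hv hr (by omega)] at hc
    exact absurd hc (List.not_mem_nil)
  | succ N ihN =>
    intro v hN hv hr
    apply stack_body pv hpre v hv hr
    intro c hc
    obtain ⟨hclt, hcnp⟩ := (pvKids_mem pv v c).mp hc
    exact ihN c (by have := pvKids_cnt_lt pv hpre hv hr hc; omega) (by omega)
      (pvRooted_child pv hpre hr hclt hcnp)

lemma alt_sizes_eq (pv : List Int) (hpre : pvPre pv) :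
    stackLoop (p2cChildren pv) (2 * pv.length + 4) [((pv.length : Int), false)]
      (List.replicate (pv.length + 1) (0 : Int)) =
    updSub pv pv.length (List.replicate (pv.length + 1) (0 : Int)) := by
  have hle := pvCnt_le pv pv.length
  rw [show 2 * pv.length + 4 =
      2 * (pvCnt pv pv.length + 1) + (2 * pv.length + 2 - 2 * pvCnt pv pv.length) by omega,
    stack_spec pv hpre (pvCnt pv pv.length) pv.length (le_refl _) (le_refl _)
      (pvRooted_root pv) _ _ _ (by rw [List.length_replicate]),
    stackLoop_nil]

-- ---------- assembling ----------

lemma sizes_eq (pv : List Int) (hpre : pvPre pv) :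
    (subtreeSizeRec (p2cChildren pv) (pv.length + 2) (pv.length : Int)
      ((PySem.List.pyRange 0 ((pv.length : Int) + 1) 1).map (fun _ => (0 : Int)))).1 =
    stackLoop (p2cChildren pv) (2 * pv.length + 4) [((pv.length : Int), false)]
      ((PySem.List.pyRange 0 ((pv.length : Int) + 1) 1).map (fun _ => (0 : Int))) := by
  rw [initTable_eq, alt_sizes_eq pv hpre]
  have hz : ∀ u, u < pv.length + 1 → pvInSub pv pv.length u →
      (List.replicate (pv.length + 1) (0 : Int)).getD u 0 = 0 := by
    intro u hu _
    rw [List.getD_replicate _ hu]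
  obtain ⟨hlen, hget, -⟩ := dfs_spec pv hpre (pv.length + 2) pv.length
    (List.replicate (pv.length + 1) (0 : Int)) (le_refl _) (pvRooted_root pv)
    (by rw [pvDepth_root]; omega) (by simp) hz
  apply List.ext_getElem
  · rw [hlen, updSub_length]
  · intro u hu1 hu2
    have hu : u < pv.length + 1 := by rw [updSub_length] at hu2; exact hu2
    have h1 := hget u hu
    rw [List.getD_eq_getElem _ _ hu1] at h1
    rw [h1, ← List.getD_eq_getElem _ (0 : Int) hu2, updSub_getD pv _ _ hu]

-- ===== VERDICT (by name: the statement is the Claim_ definition above) =====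
theorem parent2children_spec : Claim_equal_parent2children := by
  intro parVec reorder _ hpre
  unfold Spec_parent2children parent2children parent2children_alt
  cases reorder with
  | false => simp only [Bool.false_eq_true, if_false]
  | true =>
    simp only [if_true]
    rw [sizes_eq parVec hpre]
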